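-- pv_equiv track=rewrite | github.com/loegnah/algorithm_src | codejam_lge/2021-r3/A/Main.py | solve
-- ===== SOURCE A (Python) =====
-- def solve(dat):
--   n, k = len(dat), len(dat[0])
--   cnt = [dict() for i in range(k+1)]
--
--   for i in range(n):
--     cu, counter = 0, [0 for j in range(26)]
--     for j in range(k):
--       if 'A' <= dat[i][j] and dat[i][j] <= 'Z':
--         cu += 1
--       v = ord(dat[i][j]) - ord('A') if dat[i][j] <= 'Z' else ord(dat[i][j]) - ord('a')
--       counter[v] += 1
--     counter = tuple(counter)
--     if counter not in cnt[cu]: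
--       cnt[cu][counter] = 0
--     cnt[cu][counter] = cnt[cu][counter] + 1
--
--   ans = 0
--   for i in range(k+1):
--     for _, v in cnt[i].items():
--       ans += (v * (v-1)) // 2
--   return ans
-- ===== SOURCE B (Python) =====
-- def solve(dat):
--   n, k = len(dat), len(dat[0])
--   keys = []
--   for i in range(n):
--     cu, counter = 0, [0 for j in range(26)]
--     for j in range(k):
--       if 'A' <= dat[i][j] and dat[i][j] <= 'Z':
--         cu += 1
--       v = ord(dat[i][j]) - ord('A') if dat[i][j] <= 'Z' else ord(dat[i][j]) - ord('a')
--       counter[v] += 1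
--     keys.append((cu, tuple(counter)))
--   ans = 0
--   while keys:
--     x = keys[0]
--     c = keys.count(x)
--     ans += c * (c - 1) // 2
--     keys = [y for y in keys if y != x]
--   return ans
-- ===== Notes on version B (the rewrite author's own statement) =====
-- stated objective: alternative
-- what changed: A groups rows into an array of k+1 dicts keyed by the 26-slot counter and then sums v*(v-1)//2 over all stored multiplicities in a second double loop; B uses no dict at all: it stores each row's (uppercase-count, counter) key in a list and runs an iterative partition refinement, repeatedly counting the first key's whole equivalence class with list.count, adding c*(c-1)//2, and filtering that class out.
import Mathlib
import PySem

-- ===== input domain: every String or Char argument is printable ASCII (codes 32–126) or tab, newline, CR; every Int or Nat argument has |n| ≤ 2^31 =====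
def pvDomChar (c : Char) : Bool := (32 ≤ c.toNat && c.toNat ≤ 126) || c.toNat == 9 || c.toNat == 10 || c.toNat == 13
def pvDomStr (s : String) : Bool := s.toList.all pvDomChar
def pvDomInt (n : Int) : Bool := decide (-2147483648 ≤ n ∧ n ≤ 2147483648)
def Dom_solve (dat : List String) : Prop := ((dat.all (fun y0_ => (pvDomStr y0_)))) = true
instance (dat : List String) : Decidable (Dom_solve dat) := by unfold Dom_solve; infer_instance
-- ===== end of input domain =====

-- B replaces A's array of k+1 dicts and its summation pass by dict-free partition refinement:
-- store each row's key in a list, then repeatedly count the first key's class and filter it out.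

-- shared helper: the per-row inner loop both Pythons contain verbatim
-- (cu = uppercase count; counter[v] += 1 with Python's negative-index wraparound; an out-of-range
--  index leaves the list unchanged where Python raises IndexError — those inputs are outside Pre_solve)
def pvRowStep (s : String) (st : Nat × List Int) (j : Nat) : Nat × List Int :=
  let c := s.toList.getD j ' '
  let cu := if 65 ≤ c.toNat ∧ c.toNat ≤ 90 then st.1 + 1 else st.1
  let v : Int := if c.toNat ≤ 90 then (c.toNat : Int) - 65 else (c.toNat : Int) - 97
  let idx : Int := if v < 0 then v + st.2.length else v
  (cu, if 0 ≤ idx ∧ idx < (st.2.length : Int) then st.2.set idx.toNat (st.2.getD idx.toNat 0 + 1) else st.2)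

def pvRowKey (s : String) (k : Nat) : Nat × List Int :=
  (List.range k).foldl (pvRowStep s) (0, List.replicate 26 0)

-- ===== PORT A =====
def solve (dat : List String) : Int :=
  let n := dat.length
  let k := (dat.headD "").toList.length
  let cnt0 : List (PySem.Dict (List Int) Int) := (List.range (k+1)).map (fun _ => PySem.Dict.empty)
  let cnt := (List.range n).foldl
    (fun cnt i =>
      let key := pvRowKey (dat.getD i "") k
      let d0 := cnt.getD key.1 PySem.Dict.empty
      let d := if d0.contains key.2 then d0 else d0.insert key.2 0
      cnt.set key.1 (d.insert key.2 (d.getD key.2 0 + 1)))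
    cnt0
  (List.range (k+1)).foldl
    (fun ans i =>
      ((cnt.getD i PySem.Dict.empty).items).foldl
        (fun ans p => ans + PySem.Int.floordiv (p.2 * (p.2 - 1)) 2) ans)
    0

-- ===== PORT B =====
-- B's while loop: take the first key, count its whole class, add c*(c-1)//2, filter the class out
def pvPairsB (ans : Int) (ks : List (Nat × List Int)) : Int :=
  match ks with
  | [] => ans
  | x :: t =>
    let c : Int := (((x :: t).count x : Nat) : Int)
    pvPairsB (ans + PySem.Int.floordiv (c * (c - 1)) 2) ((x :: t).filter (fun y => !(y == x)))
termination_by ks.length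
decreasing_by
  simp only [List.filter_cons, BEq.refl, Bool.not_true, if_neg (by simp : ¬ (false = true)),
    List.length_cons]
  exact Nat.lt_succ_of_le (List.length_filter_le _ _)

-- keys-list building loop (Python's append loop) then the partition-refinement while loop
def solve_alt (dat : List String) : Int :=
  let n := dat.length
  let k := (dat.headD "").toList.length
  let keys := (List.range n).map (fun i => pvRowKey (dat.getD i "") k)
  pvPairsB 0 keys

-- ===== PRECONDITION & SPEC =====
-- Pre_solve = exactly where the Python A returns: dat nonempty (else dat[0] raises IndexError), every
-- row at least as long as the first (else dat[i][j] raises), and every inspected character (the first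
-- k of each row) has code in [39,122] (else counter[v] raises IndexError: v < -26 or v > 25).
def Pre_solve (dat : List String) : Prop :=
  dat ≠ [] ∧
    (dat.all (fun s => decide ((dat.headD "").toList.length ≤ s.toList.length) &&
      (s.toList.take ((dat.headD "").toList.length)).all
        (fun c => decide (39 ≤ c.toNat) && decide (c.toNat ≤ 122)))) = true
instance (dat : List String) : Decidable (Pre_solve dat) := by unfold Pre_solve; infer_instance
def pvWitness_solve : List String := ["aB0", "b0A", "xyz"]
def Spec_solve (dat : List String) (out : Int) : Prop := out = solve_alt dat
instance (dat : List String) (out : Int) : Decidable (Spec_solve dat out) := by unfold Spec_solve; infer_instance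

-- ===== CLAIM (what is proved, stated in full; the proofs are below) =====
def Claim_equal_solve : Prop := ∀ (dat : List String), Dom_solve dat → Pre_solve dat → Spec_solve dat (solve dat)

-- ===== LEMMAS AND PROOFS =====

-- the loop body of port A, on an arbitrary key
def pvAStep (cnt : List (PySem.Dict (List Int) Int)) (key : Nat × List Int) :
    List (PySem.Dict (List Int) Int) :=
  let d0 := cnt.getD key.1 PySem.Dict.empty
  let d := if d0.contains key.2 then d0 else d0.insert key.2 0
  cnt.set key.1 (d.insert key.2 (d.getD key.2 0 + 1))

def pvACnt (k : Nat) (L : List (Nat × List Int)) : List (PySem.Dict (List Int) Int) :=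
  L.foldl pvAStep ((List.range (k+1)).map (fun _ => PySem.Dict.empty))

def pvG (v : Int) : Int := PySem.Int.floordiv (v * (v - 1)) 2

def pvAsum (k : Nat) (cnt : List (PySem.Dict (List Int) Int)) : Int :=
  (List.range (k+1)).foldl
    (fun ans i => ((cnt.getD i PySem.Dict.empty).items).foldl (fun ans p => ans + pvG p.2) ans) 0

-- proof-side intermediate form: incremental prefix counting (not a port)
def pvBStep (st : Int × PySem.Dict (Nat × List Int) Int) (key : Nat × List Int) :
    Int × PySem.Dict (Nat × List Int) Int :=
  let m := st.2.getD key 0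
  (st.1 + m, st.2.insert key (m + 1))

-- per-group sum of pair counts (generic in the element type), and the per-index summand of
-- A's final double loop
def pvSsum {α : Type} [BEq α] [LawfulBEq α] (xs : List α) : Int :=
  ((PySem.Dict.counter xs).items.map (fun p => pvG p.2)).sum

def pvF (L : List (Nat × List Int)) (i : Nat) : Int :=
  pvSsum ((L.filter (fun p => p.1 == i)).map (·.2))

-- A's "if counter not in d: d[counter] = 0; d[counter] = d[counter] + 1" is one counting insert
theorem pv_dict_step (d : PySem.Dict (List Int) Int) (c : List Int) :
    (if d.contains c then d else d.insert c 0).insert c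
        ((if d.contains c then d else d.insert c 0).getD c 0 + 1)
      = d.insert c (d.getD c 0 + 1) := by
  by_cases h : d.contains c
  · simp [h]
  · have h0 : d.contains c = false := by simpa using h
    simp [h0, PySem.Dict.getD_insert_self, PySem.Dict.insert_insert_self,
      PySem.Dict.getD_of_not_contains d 0 h0]

theorem pv_sum_map_update {α : Type} [BEq α] [LawfulBEq α] (f f' : α → Int) :
    ∀ (S : List α) (c : α), (∀ x ∈ S, x ≠ c → f' x = f x) → S.count c = 1 →
      (S.map f').sum = (S.map f).sum + (f' c - f c) := by
  intro S
  induction S with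
  | nil => intro c _ hc; simp at hc
  | cons a t ih =>
    intro c h hc
    by_cases hac : a = c
    · subst hac
      rw [List.count_cons] at hc
      simp at hc
      have hmem : a ∉ t := List.count_eq_zero.mp hc
      have hmap : t.map f' = t.map f := by
        apply List.map_congr_left
        intro x hx
        exact h x (List.mem_cons_of_mem _ hx) (fun hxa => hmem (hxa ▸ hx))
      simp [hmap]; ring
    · have hct : t.count c = 1 := by
        rw [List.count_cons] at hc
        simp [hac] at hc
        exact hc
      have hrec := ih c (fun x hx hxc => h x (List.mem_cons_of_mem _ hx) hxc) hct
      have hfa : f' a = f a := h a (List.mem_cons_self) hac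
      simp [hrec, hfa]; ring

theorem pv_count_filter_map (cu : Nat) (c : List Int) (L : List (Nat × List Int)) :
    ((L.filter (fun p => p.1 == cu)).map (·.2)).count c = L.count (cu, c) := by
  induction L with
  | nil => rfl
  | cons p t ih =>
    obtain ⟨a, b⟩ := p
    by_cases h1 : a = cu
    · subst h1
      by_cases h2 : b = c <;>
        simp [ih, Prod.ext_iff, h2]
    · simp [ih, Prod.ext_iff, h1]

theorem pvG_natCast (m : Nat) : pvG (m : Int) = ((m * (m - 1) / 2 : Nat) : Int) := by
  cases m with
  | zero => decide
  | succ n =>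
    have h1 : ((n+1 : Nat) : Int) * (((n+1 : Nat) : Int) - 1) = (((n+1) * n : Nat) : Int) := by
      push_cast; ring
    rw [pvG, h1, show (2:Int) = ((2:Nat):Int) from rfl, PySem.Int.floordiv_natCast]
    simp

theorem pvG_succ (m : Nat) : pvG ((m : Int) + 1) = pvG (m : Int) + m := by
  have h : ((m : Int) + 1) = ((m + 1 : Nat) : Int) := by push_cast; ring
  rw [h, pvG_natCast, pvG_natCast]
  have hnat : (m + 1) * (m + 1 - 1) / 2 = m * (m - 1) / 2 + m := by
    cases m with
    | zero => rfl
    | succ t =>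
      simp only [Nat.add_sub_cancel]
      have he : (t + 1 + 1) * (t + 1) = (t + 1) * t + (t + 1) * 2 := by ring
      rw [he, Nat.add_mul_div_right _ _ (by norm_num)]
  rw [hnat]; push_cast; ring

theorem pvSsum_snoc {α : Type} [BEq α] [LawfulBEq α] (xs : List α) (c : α) :
    pvSsum (xs ++ [c]) = pvSsum xs + (xs.count c : Int) := by
  unfold pvSsum
  rw [PySem.Dict.items_counter, PySem.Dict.items_counter, List.map_map, List.map_map]
  simp only [Function.comp_def]
  have hset : PySem.Set.ofList (xs ++ [c]) = PySem.Set.add (PySem.Set.ofList xs) c := by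
    rw [PySem.Set.ofList_eq_foldl, PySem.Set.ofList_eq_foldl, List.foldl_append]; rfl
  by_cases hc : c ∈ xs
  · have hadd : PySem.Set.ofList (xs ++ [c]) = PySem.Set.ofList xs := by
      rw [hset]; simp [PySem.Set.add, hc]
    rw [hadd]
    have h1 : ∀ x ∈ PySem.Set.ofList xs, x ≠ c →
        (fun k => pvG ((List.count k (xs ++ [c]) : Nat) : Int)) x
          = (fun k => pvG ((List.count k xs : Nat) : Int)) x := by
      intro x _ hxc
      simp [List.count_append, Ne.symm hxc]
    have h2 : (PySem.Set.ofList xs).count c = 1 := by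
      have hle := List.nodup_iff_count_le_one.mp (PySem.Set.nodup_ofList xs) c
      have hpos : 0 < (PySem.Set.ofList xs).count c :=
        List.count_pos_iff.mpr ((PySem.Set.mem_ofList xs c).mpr hc)
      omega
    rw [pv_sum_map_update _ _ _ c h1 h2]
    have hcc : List.count c (xs ++ [c]) = List.count c xs + 1 := by
      simp [List.count_append]
    rw [hcc]
    push_cast
    rw [pvG_succ]
    ring
  · have hadd : PySem.Set.ofList (xs ++ [c]) = PySem.Set.ofList xs ++ [c] := by
      rw [hset]; simp [PySem.Set.add, hc]
    rw [hadd, List.map_append, List.sum_append]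
    have h1 : (PySem.Set.ofList xs).map (fun k => pvG ((List.count k (xs ++ [c]) : Nat) : Int))
        = (PySem.Set.ofList xs).map (fun k => pvG ((List.count k xs : Nat) : Int)) := by
      apply List.map_congr_left
      intro x hx
      have hxc : x ≠ c := fun he => hc (he ▸ (PySem.Set.mem_ofList xs x).mp hx)
      simp [List.count_append, Ne.symm hxc]
    have h2 : List.count c (xs ++ [c]) = 1 := by
      simp [List.count_append, List.count_eq_zero.mpr hc]
    have h3 : List.count c xs = 0 := List.count_eq_zero.mpr hc
    have h4 : (List.map (fun k => pvG ((List.count k (xs ++ [c]) : Nat) : Int)) [c]).sum = 0 := by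
      simp only [List.map_cons, List.map_nil, List.sum_cons, List.sum_nil, h2]
      decide
    rw [h1, h3, h4]
    simp

theorem pvACnt_length (k : Nat) (L : List (Nat × List Int)) : (pvACnt k L).length = k + 1 := by
  unfold pvACnt
  have h : ∀ (M : List (Nat × List Int)) (cnt : List (PySem.Dict (List Int) Int)),
      (M.foldl pvAStep cnt).length = cnt.length := by
    intro M
    induction M with
    | nil => intro cnt; rfl
    | cons x t ih => intro cnt; rw [List.foldl_cons, ih]; simp [pvAStep]
  rw [h]; simp

theorem pvACnt_getD (k : Nat) (L : List (Nat × List Int)) (h : ∀ p ∈ L, p.1 ≤ k) :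
    ∀ cu, (pvACnt k L).getD cu PySem.Dict.empty
      = PySem.Dict.counter ((L.filter (fun p => p.1 == cu)).map (·.2)) := by
  revert h
  induction L using List.reverseRecOn with
  | nil =>
    intro _ cu
    show ((List.range (k+1)).map (fun _ => PySem.Dict.empty)).getD cu PySem.Dict.empty = _
    by_cases hcu : cu < k + 1
    · rw [PySem.List.getD_map_range _ _ _ _ hcu]; rfl
    · rw [List.getD_eq_getElem?_getD, List.getElem?_map]
      have hnone : (List.range (k+1))[cu]? = none := by
        rw [List.getElem?_eq_none_iff]; simpa using hcu
      rw [hnone]; rfl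
  | append_singleton L x ih =>
    intro h cu
    have hx : x.1 ≤ k := h x (by simp)
    have hL : ∀ p ∈ L, p.1 ≤ k := fun p hp => h p (by simp [hp])
    have hstep : pvACnt k (L ++ [x]) = pvAStep (pvACnt k L) x := by
      unfold pvACnt; rw [List.foldl_append]; rfl
    have hnew : pvAStep (pvACnt k L) x
        = (pvACnt k L).set x.1
            (PySem.Dict.counter (((L.filter (fun p => p.1 == x.1)).map (·.2)) ++ [x.2])) := by
      simp only [pvAStep]
      rw [pv_dict_step, ih hL x.1, PySem.Dict.counter_append_singleton]
      rfl
    rw [hstep, hnew]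
    rw [List.getD_eq_getElem?_getD, List.getElem?_set]
    by_cases hcu : x.1 = cu
    · subst hcu
      have hlt : x.1 < (pvACnt k L).length := by rw [pvACnt_length]; omega
      simp only [if_pos hlt]
      rw [List.filter_append, List.map_append]
      simp
    · rw [if_neg hcu, ← List.getD_eq_getElem?_getD, ih hL cu]
      congr 1
      rw [List.filter_append]
      have hnil : (List.filter (fun p => p.1 == cu) [x]) = [] := by
        simp [hcu]
      rw [hnil, List.append_nil]

theorem pvAsum_eq (k : Nat) (cnt : List (PySem.Dict (List Int) Int)) :
    pvAsum k cnt
      = ((List.range (k+1)).map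
          (fun i => (((cnt.getD i PySem.Dict.empty).items).map (fun p => pvG p.2)).sum)).sum := by
  unfold pvAsum
  simp only [PySem.List.foldl_add]
  simp

theorem pvBsnd (L : List (Nat × List Int)) (a : Int) (d : PySem.Dict (Nat × List Int) Int) :
    (L.foldl pvBStep (a, d)).2 = L.foldl (fun d x => d.insert x (d.getD x 0 + 1)) d := by
  induction L generalizing a d with
  | nil => rfl
  | cons x t ih => simp [pvBStep, ih]

theorem pvBfst_snoc (L : List (Nat × List Int)) (x : Nat × List Int) :
    ((L ++ [x]).foldl pvBStep (0, PySem.Dict.empty)).1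
      = (L.foldl pvBStep (0, PySem.Dict.empty)).1 + (L.count x : Int) := by
  rw [List.foldl_append]
  simp only [List.foldl_cons, List.foldl_nil]
  show (L.foldl pvBStep (0, PySem.Dict.empty)).1
      + (L.foldl pvBStep (0, PySem.Dict.empty)).2.getD x 0 = _
  rw [pvBsnd, PySem.Dict.getD_foldl_insert_add_one, PySem.Dict.getD_empty]
  ring

theorem pv_main (k : Nat) (L : List (Nat × List Int)) (h : ∀ p ∈ L, p.1 ≤ k) :
    pvAsum k (pvACnt k L) = (L.foldl pvBStep (0, PySem.Dict.empty)).1 := by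
  revert h
  induction L using List.reverseRecOn with
  | nil =>
    intro _
    rw [pvAsum_eq]
    have hz : ∀ i ∈ List.range (k+1),
        (((pvACnt k []).getD i PySem.Dict.empty).items.map (fun p => pvG p.2)).sum
          = (fun _ => (0 : Int)) i := by
      intro i _
      rw [pvACnt_getD k [] (by simp) i]
      rfl
    rw [List.map_congr_left hz]
    simp
  | append_singleton L x ih =>
    intro h
    have hx : x.1 ≤ k := h x (by simp)
    have hL : ∀ p ∈ L, p.1 ≤ k := fun p hp => h p (by simp [hp])
    have hmap : ∀ (M : List (Nat × List Int)), (∀ p ∈ M, p.1 ≤ k) →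
        (List.range (k+1)).map
            (fun i => (((pvACnt k M).getD i PySem.Dict.empty).items.map (fun p => pvG p.2)).sum)
          = (List.range (k+1)).map (pvF M) := by
      intro M hM
      apply List.map_congr_left
      intro i _
      rw [pvACnt_getD k M hM i]
      rfl
    rw [pvBfst_snoc, ← ih hL, pvAsum_eq, pvAsum_eq, hmap L hL, hmap (L ++ [x]) h]
    have h1 : ∀ i ∈ List.range (k+1), i ≠ x.1 → pvF (L ++ [x]) i = pvF L i := by
      intro i _ hix
      unfold pvF
      rw [List.filter_append]
      have hnil : (List.filter (fun p => p.1 == i) [x]) = [] := by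
        simp [Ne.symm hix]
      rw [hnil, List.append_nil]
    have h2 : (List.range (k+1)).count x.1 = 1 := by
      have hle := List.nodup_iff_count_le_one.mp (List.nodup_range (n := k+1)) x.1
      have hpos : 0 < (List.range (k+1)).count x.1 :=
        List.count_pos_iff.mpr (by simp; omega)
      omega
    rw [pv_sum_map_update (pvF L) (pvF (L ++ [x])) _ x.1 h1 h2]
    have hfilt : (L ++ [x]).filter (fun p => p.1 == x.1)
        = L.filter (fun p => p.1 == x.1) ++ [x] := by
      rw [List.filter_append]
      congr 1
      simp
    have hdiff : pvF (L ++ [x]) x.1 = pvF L x.1 + (L.count x : Int) := by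
      unfold pvF
      rw [hfilt, List.map_append]
      have hs := pvSsum_snoc ((L.filter (fun p => p.1 == x.1)).map (·.2)) x.2
      rw [pv_count_filter_map] at hs
      simpa using hs
    rw [hdiff]
    ring

-- the incremental prefix-count fold computes the per-class pair sum
theorem pvBfst_eq_pvSsum (L : List (Nat × List Int)) :
    (L.foldl pvBStep (0, PySem.Dict.empty)).1 = pvSsum L := by
  induction L using List.reverseRecOn with
  | nil => rfl
  | append_singleton L x ih =>
    rw [pvBfst_snoc, pvSsum_snoc, ih]

theorem pv_count_filter_ne {α : Type} [BEq α] [LawfulBEq α] (x y : α) (hyx : y ≠ x) :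
    ∀ (l : List α), (l.filter (fun z => !(z == x))).count y = l.count y := by
  intro l
  induction l with
  | nil => rfl
  | cons a t ih =>
    by_cases hax : a = x
    · subst hax
      have hya : (a == y) = false := by simpa using (Ne.symm hyx)
      simp [List.count_cons, hya, ih]
    · have hax' : (a == x) = false := by simpa using hax
      simp [List.count_cons, hax', ih]

-- peeling one equivalence class off the front of the list
theorem pvSsum_head {α : Type} [BEq α] [LawfulBEq α] (x : α) (t : List α) :
    pvSsum (x :: t)
      = pvG ((((x :: t).count x : Nat)) : Int)
          + pvSsum ((x :: t).filter (fun y => !(y == x))) := by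
  unfold pvSsum
  rw [PySem.Dict.items_counter, PySem.Dict.items_counter, List.map_map, List.map_map]
  simp only [Function.comp_def]
  have hx : x ∈ PySem.Set.ofList (x :: t) :=
    (PySem.Set.mem_ofList _ _).mpr (List.mem_cons_self)
  have hperm := List.perm_cons_erase hx
  rw [(hperm.map (fun k => pvG ((List.count k (x :: t) : Nat) : Int))).sum_eq]
  simp only [List.map_cons, List.sum_cons]
  congr 1
  -- the remaining distinct elements and their counts are those of the filtered list
  have hnd : ((PySem.Set.ofList (x :: t)).erase x).Nodup :=
    (PySem.Set.nodup_ofList (x :: t)).erase x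
  have hnd2 : (PySem.Set.ofList ((x :: t).filter (fun y => !(y == x)))).Nodup :=
    PySem.Set.nodup_ofList _
  have hmem : ∀ y, y ∈ (PySem.Set.ofList (x :: t)).erase x ↔
      y ∈ PySem.Set.ofList ((x :: t).filter (fun y => !(y == x))) := by
    intro y
    rw [(PySem.Set.nodup_ofList (x :: t)).mem_erase_iff, PySem.Set.mem_ofList,
      PySem.Set.mem_ofList, List.mem_filter]
    constructor
    · rintro ⟨hyx, hy⟩
      exact ⟨hy, by simpa using hyx⟩
    · rintro ⟨hy, hyx⟩
      exact ⟨by simpa using hyx, hy⟩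
  have hperm2 : ((PySem.Set.ofList (x :: t)).erase x).Perm
      (PySem.Set.ofList ((x :: t).filter (fun y => !(y == x)))) :=
    (List.perm_ext_iff_of_nodup hnd hnd2).mpr hmem
  have hcong : ∀ y ∈ (PySem.Set.ofList (x :: t)).erase x,
      pvG ((List.count y (x :: t) : Nat) : Int)
        = pvG ((List.count y ((x :: t).filter (fun y => !(y == x))) : Nat) : Int) := by
    intro y hy
    have hyx : y ≠ x := ((PySem.Set.nodup_ofList (x :: t)).mem_erase_iff.mp hy).1
    rw [pv_count_filter_ne x y hyx]
  rw [List.map_congr_left hcong,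
    (hperm2.map (fun k => pvG ((List.count k ((x :: t).filter (fun y => !(y == x))) : Nat) : Int))).sum_eq]

-- B's while loop computes ans + the per-class pair sum
theorem pvPairsB_eq (ans : Int) (ks : List (Nat × List Int)) :
    pvPairsB ans ks = ans + pvSsum ks := by
  induction ans, ks using pvPairsB.induct with
  | case1 ans =>
    rw [pvPairsB]
    show ans = ans + pvSsum ([] : List (Nat × List Int))
    have h0 : pvSsum ([] : List (Nat × List Int)) = 0 := rfl
    rw [h0, add_zero]
  | case2 ans x t c ih =>
    rw [pvPairsB]
    show pvPairsB (ans + PySem.Int.floordiv (c * (c - 1)) 2)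
        ((x :: t).filter (fun y => !(y == x))) = ans + pvSsum (x :: t)
    rw [ih, pvSsum_head]
    have hc : PySem.Int.floordiv (c * (c - 1)) 2
        = pvG ((((x :: t).count x : Nat)) : Int) := rfl
    rw [hc]
    ring

theorem pvRowKey_fst_le (s : String) (k : Nat) : (pvRowKey s k).1 ≤ k := by
  have haux : ∀ (l : List Nat) (st : Nat × List Int),
      (l.foldl (pvRowStep s) st).1 ≤ st.1 + l.length := by
    intro l
    induction l with
    | nil => intro st; simp
    | cons j t ih =>
      intro st
      rw [List.foldl_cons]
      have hstep : (pvRowStep s st j).1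
          = (if 65 ≤ (s.toList.getD j ' ').toNat ∧ (s.toList.getD j ' ').toNat ≤ 90
             then st.1 + 1 else st.1) := rfl
      have hb : (pvRowStep s st j).1 ≤ st.1 + 1 := by
        rw [hstep]; split_ifs <;> omega
      have := ih (pvRowStep s st j)
      simp only [List.length_cons]
      omega
  have := haux (List.range k) (0, List.replicate 26 0)
  simpa [pvRowKey] using this

-- ===== VERDICT (by name: the statement is the Claim_ definition above) =====
theorem solve_spec : Claim_equal_solve := by
  intro dat _ _
  show solve dat = solve_alt dat
  set k := (dat.headD "").toList.length with hk
  set keys := (List.range dat.length).map (fun i => pvRowKey (dat.getD i "") k) with hkeys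
  have hA : solve dat = pvAsum k (pvACnt k keys) := by
    unfold solve pvAsum pvACnt pvAStep
    rw [hkeys, List.foldl_map]
    rfl
  have hlen : keys.length = dat.length := by rw [hkeys]; simp
  have hB : solve_alt dat = pvPairsB 0 keys := rfl
  rw [hA, hB, pvPairsB_eq, zero_add, ← pvBfst_eq_pvSsum]
  apply pv_main
  intro p hp
  rw [hkeys, List.mem_map] at hp
  obtain ⟨i, _, rfl⟩ := hp
  exact pvRowKey_fst_le _ _
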